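-- pv_equiv track=rewrite | github.com/davdxpx/XTV-SupportBot | src/xtv_support/core/ui_mode.py | client_supports_webapp
-- ===== SOURCE A (Python) =====
-- MIN_WEBAPP_CLIENT_VERSION = (6, 0)
--
-- def _parse_version(raw: str | None) -> tuple[int, ...]:
--     if not raw:
--         return ()
--     out: list[int] = []
--     for part in raw.split("."):
--         digits = "".join(c for c in part if c.isdigit())
--         if not digits:
--             break
--         out.append(int(digits))
--     return tuple(out)
--
-- def client_supports_webapp(client_version: str | None) -> bool:
--     """Return True if the given Telegram client string looks WebApp-capable.
--
--     Missing / unparseable versions default to ``True`` — we'd rather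
--     let a modern client through than gate it on missing metadata.
--     The downgrade is strictly defensive: old clients + WebApp button
--     render a silent no-op.
--     """
--     parsed = _parse_version(client_version)
--     if not parsed:
--         return True
--     for required, actual in zip(MIN_WEBAPP_CLIENT_VERSION, parsed, strict=False):
--         if actual > required:
--             return True
--         if actual < required:
--             return False
--     return True
-- ===== SOURCE B (Python) =====
-- MIN_WEBAPP_CLIENT_VERSION = (6, 0)
--
-- def client_supports_webapp(client_version):
--     """Only the major component can ever decide the outcome (components are
--     non-negative and the minimum's minor bound is 0), so look at the first
--     dot-separated piece only — no version tuple, no comparison loop."""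
--     if not client_version:
--         return True
--     first = client_version.split(".")[0]
--     digits = "".join(c for c in first if c.isdigit())
--     return not digits or int(digits) >= MIN_WEBAPP_CLIENT_VERSION[0]
-- ===== Notes on version B (the rewrite author's own statement) =====
-- stated objective: simpler
-- what changed: B drops the parse-all-components loop and the zip comparison loop entirely: it extracts only the first dot-separated piece and decides with one closed-form major-version check (valid because parsed components are non-negative and the minimum's minor bound is 0).
import Mathlib
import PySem

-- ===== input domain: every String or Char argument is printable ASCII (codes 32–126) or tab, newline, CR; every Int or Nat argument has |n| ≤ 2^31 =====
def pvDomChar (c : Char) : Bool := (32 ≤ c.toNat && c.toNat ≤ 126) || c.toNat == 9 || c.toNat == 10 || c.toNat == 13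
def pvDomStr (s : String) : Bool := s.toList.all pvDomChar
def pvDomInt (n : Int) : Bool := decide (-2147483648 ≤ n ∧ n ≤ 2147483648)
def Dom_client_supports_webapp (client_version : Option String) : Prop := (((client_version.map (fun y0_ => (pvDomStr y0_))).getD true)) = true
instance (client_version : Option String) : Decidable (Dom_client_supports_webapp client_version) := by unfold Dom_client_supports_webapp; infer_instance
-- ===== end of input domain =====

-- B drops A's parse-all-components loop and zip comparison loop: it examines only the
-- first dot-separated piece and decides with one closed-form major-version check
-- (simpler; equal because parsed components are non-negative and the minor bound is 0).

-- ===== PORT A =====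
-- _parse_version's loop body with `break`
def pvParseLoop (parts : List (List Char)) (out : List Int) : List Int :=
  match parts with
  | [] => out
  | part :: rest =>
    let digits := part.filter PySem.Chars.isdigit
    if digits = [] then out
    else
      -- int(digits): digits is nonempty and all-digit, so ofChars? is always `some`; getD 0 is never taken
      pvParseLoop rest (out ++ [(PySem.Int.ofChars? digits).getD 0])

def pvParseVersion (raw : Option String) : List Int :=
  match raw with
  | none => []
  | some s =>
    if s.toList = [] then []
    else
      -- raw.split("."): separator is nonempty, so split? is always `some`
      pvParseLoop ((PySem.Chars.split? s.toList ['.']).getD []) []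

def pvWebappLoop : List (Int × Int) → Bool
  | [] => true
  | (required, actual) :: rest =>
    if actual > required then true
    else if actual < required then false
    else pvWebappLoop rest

def client_supports_webapp (client_version : Option String) : Bool :=
  let parsed := pvParseVersion client_version
  if parsed = [] then true
  else pvWebappLoop (List.zip [(6 : Int), 0] parsed)

-- ===== PORT B =====
def client_supports_webapp_alt (client_version : Option String) : Bool :=
  match client_version with
  | none => true
  | some s =>
    if s.toList = [] then true
    else
      -- client_version.split(".")[0]: split of a nonempty separator always returns a
      -- nonempty list, so the [0] never raises; headD [] is that first element
      let first := ((PySem.Chars.split? s.toList ['.']).getD []).headD []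
      let digits := first.filter PySem.Chars.isdigit
      digits = [] || decide (6 ≤ (PySem.Int.ofChars? digits).getD 0)

-- ===== PRECONDITION & SPEC =====
def Spec_client_supports_webapp (client_version : Option String) (out : Bool) : Prop := out = client_supports_webapp_alt client_version
instance (client_version : Option String) (out : Bool) : Decidable (Spec_client_supports_webapp client_version out) := by unfold Spec_client_supports_webapp; infer_instance

-- ===== CLAIM (what is proved, stated in full; the proofs are below) =====
def Claim_equal_client_supports_webapp : Prop := ∀ (client_version : Option String), Dom_client_supports_webapp client_version → Spec_client_supports_webapp client_version (client_supports_webapp client_version)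

-- ===== LEMMAS AND PROOFS =====
theorem pv_digit_not_space (c : Char) (h : PySem.Chars.isdigit c = true) : PySem.Int.isIntSpace c = false := by
  simp [PySem.Chars.isdigit, Char.le_def] at h
  simp [PySem.Int.isIntSpace]
  repeat' apply And.intro
  all_goals (rintro rfl; revert h; decide)

theorem pv_opt_cast_nonneg (o : Option Nat) :
    0 ≤ (Option.map (fun n : Int => n) (o.bind (fun a => pure ((a : Int))))).getD 0 := by
  cases o <;> simp

theorem pv_ofChars_digits_nonneg (ds : List Char) (h1 : ds ≠ [])
    (h2 : ∀ c ∈ ds, PySem.Chars.isdigit c = true) :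
    0 ≤ (PySem.Int.ofChars? ds).getD 0 := by
  unfold PySem.Int.ofChars?
  have hd1 : ∀ c ∈ ds, PySem.Int.isIntSpace c = false := fun c hc => pv_digit_not_space c (h2 c hc)
  have e1 : ds.dropWhile PySem.Int.isIntSpace = ds := by
    cases ds with
    | nil => rfl
    | cons a t => simp [List.dropWhile, hd1 a (by simp)]
  rw [e1]
  have e2 : ds.reverse.dropWhile PySem.Int.isIntSpace = ds.reverse := by
    cases hr : ds.reverse with
    | nil => rfl
    | cons a t =>
      have ha : a ∈ ds := List.mem_reverse.mp (by rw [hr]; simp)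
      simp [List.dropWhile, hd1 a ha]
  rw [e2, List.reverse_reverse]
  cases ds with
  | nil => exact absurd rfl h1
  | cons a t =>
    have ha := h2 a (by simp)
    have hm : a ≠ '-' := by rintro rfl; revert ha; decide
    have hp : a ≠ '+' := by rintro rfl; revert ha; decide
    dsimp only
    split
    · next heq => rw [List.cons.injEq] at heq; exact absurd heq.1 hm
    · next heq => rw [List.cons.injEq] at heq; exact absurd heq.1 hp
    · exact pv_opt_cast_nonneg _

theorem pv_parseLoop_nonneg (parts : List (List Char)) (out : List Int)
    (hout : ∀ y ∈ out, 0 ≤ y) : ∀ x ∈ pvParseLoop parts out, 0 ≤ x := by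
  induction parts generalizing out with
  | nil => simpa [pvParseLoop] using hout
  | cons part rest ih =>
    simp only [pvParseLoop]
    split
    · exact hout
    · next hne =>
      apply ih
      intro y hy
      rcases List.mem_append.mp hy with h | h
      · exact hout y h
      · rcases List.mem_singleton.mp h with rfl
        exact pv_ofChars_digits_nonneg _ hne (fun c hc => (List.mem_filter.mp hc).2)

-- pvParseLoop only ever appends to its accumulator
theorem pv_parseLoop_append (parts : List (List Char)) (out : List Int) :
    ∃ t, pvParseLoop parts out = out ++ t := by
  induction parts generalizing out with
  | nil => exact ⟨[], by simp [pvParseLoop]⟩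
  | cons part rest ih =>
    simp only [pvParseLoop]
    split
    · exact ⟨[], by simp⟩
    · obtain ⟨t, ht⟩ := ih (out ++ [(PySem.Int.ofChars? (part.filter PySem.Chars.isdigit)).getD 0])
      exact ⟨(PySem.Int.ofChars? (part.filter PySem.Chars.isdigit)).getD 0 :: t, by simp [ht]⟩

-- A's zip loop on a nonempty non-negative list is exactly the major-version check
theorem pv_webappLoop_head (v : Int) (t : List Int) (hv : 0 ≤ v)
    (ht : ∀ x ∈ t, 0 ≤ x) :
    pvWebappLoop (List.zip [(6 : Int), 0] (v :: t)) = decide (6 ≤ v) := by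
  rcases lt_trichotomy v 6 with h | h | h
  · have h6 : ¬ (6 : Int) ≤ v := by omega
    simp [List.zip, pvWebappLoop, h, not_lt.mpr (le_of_lt h), h6]
  · subst h
    cases t with
    | nil => simp [List.zip, pvWebappLoop]
    | cons q u =>
      have hq : 0 ≤ q := ht q (by simp)
      simp [List.zip, pvWebappLoop, not_lt.mpr hq]
  · simp [List.zip, pvWebappLoop, h, le_of_lt h]

-- ===== VERDICT (by name: the statement is the Claim_ definition above) =====
theorem client_supports_webapp_spec : Claim_equal_client_supports_webapp := by
  intro v _
  unfold Spec_client_supports_webapp client_supports_webapp client_supports_webapp_alt pvParseVersion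
  cases v with
  | none => simp
  | some s =>
    by_cases hs : s.toList = []
    · simp [hs]
    · simp only [if_neg hs]
      cases hparts : (PySem.Chars.split? s.toList ['.']).getD [] with
      | nil => simp [pvParseLoop]
      | cons p rest =>
        simp only [List.headD_cons, pvParseLoop]
        by_cases hd : p.filter PySem.Chars.isdigit = []
        · simp [hd]
        · simp only [if_neg hd, List.nil_append]
          set val := (PySem.Int.ofChars? (p.filter PySem.Chars.isdigit)).getD 0 with hval
          have hv : 0 ≤ val :=
            pv_ofChars_digits_nonneg _ hd (fun c hc => (List.mem_filter.mp hc).2)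
          obtain ⟨t, ht⟩ := pv_parseLoop_append rest [val]
          rw [ht]
          have hnn : ∀ x ∈ t, 0 ≤ x := by
            intro x hx
            have := pv_parseLoop_nonneg rest [val]
              (by intro y hy; rcases List.mem_singleton.mp hy with rfl; exact hv)
            exact this x (by rw [ht]; simp [hx])
          rw [List.singleton_append, if_neg (by simp),
            pv_webappLoop_head val t hv hnn]
          simp [hd, hval]
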